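-- pv_equiv track=rewrite | github.com/RasmitDevkota/TSSORunItCodeIt2022 | program.py | fibonnaci_series
-- ===== SOURCE A (Python) =====
-- def fibonnaci_series(string):
--     if not string.isdigit():
--         return "Please only input integers between 1 and 100, inclusive!"
--
--     count = int(string)
--
--     zero = 0
--     one = 1
--
--     if count < 1 or count > 100:
--         return "Please enter an integer between 1 and 100, inclusive!"
--     if count == 1:
--         return "0"
--     else:
--         series = "0 1"
--
--         for i in range(2,count):
--             c = zero + one
--
--             zero = one
--
--             one = c
--
--             series += " " + str(c)
--
--         return series
-- ===== SOURCE B (Python) =====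
-- def fibonnaci_series(string):
--     if not string.isdigit():
--         return "Please only input integers between 1 and 100, inclusive!"
--     count = int(string)
--     if count < 1 or count > 100:
--         return "Please enter an integer between 1 and 100, inclusive!"
--
--     def fib_pair(n):
--         # (F(n), F(n+1)) by fast doubling
--         if n == 0:
--             return (0, 1)
--         a, b = fib_pair(n // 2)
--         c = a * (2 * b - a)
--         d = a * a + b * b
--         if n % 2 == 0:
--             return (c, d)
--         return (d, c + d)
--
--     return " ".join(str(fib_pair(i)[0]) for i in range(count))
-- ===== Notes on version B (the rewrite author's own statement) =====
-- stated objective: alternative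
-- what changed: Replaces A's single running two-variable loop (seeded with the first two terms and a count==1 special case) by a recursive fast-doubling fib_pair computed independently for each index of range(count), with all terms joined once at the end.
import Mathlib
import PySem

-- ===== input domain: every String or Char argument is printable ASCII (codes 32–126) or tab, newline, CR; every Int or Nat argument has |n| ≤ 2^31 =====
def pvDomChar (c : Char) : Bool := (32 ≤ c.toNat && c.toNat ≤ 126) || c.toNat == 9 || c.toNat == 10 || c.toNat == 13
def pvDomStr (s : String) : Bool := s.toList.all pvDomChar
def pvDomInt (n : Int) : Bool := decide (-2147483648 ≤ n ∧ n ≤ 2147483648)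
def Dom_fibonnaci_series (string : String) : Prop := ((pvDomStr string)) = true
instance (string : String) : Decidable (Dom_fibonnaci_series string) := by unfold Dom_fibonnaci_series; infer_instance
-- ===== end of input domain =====

-- B keeps both validation guards and error strings, but computes each term independently with a
-- recursive fast-doubling fib_pair and joins them once, instead of A's two-variable running loop
-- seeded with "0 1" and its count==1 special case (objective: alternative).

-- ===== PORT A =====
def fibonnaci_series (string : String) : String :=
  if !PySem.Str.strIsdigit string then
    "Please only input integers between 1 and 100, inclusive!"
  else
    -- int(string): isdigit guarantees ofStr? = some, so getD 0 never supplies the default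
    let count : Int := (PySem.Int.ofStr? string).getD 0
    let zero : Int := 0
    let one : Int := 1
    if count < 1 || count > 100 then
      "Please enter an integer between 1 and 100, inclusive!"
    else if count == 1 then
      "0"
    else
      let st := (PySem.List.pyRange 2 count 1).foldl
        (fun (st : Int × Int × String) _ =>
          let c := st.1 + st.2.1
          (st.2.1, c, st.2.2 ++ " " ++ PySem.Int.toStr c))
        (zero, one, "0 1")
      st.2.2

-- ===== PORT B =====
-- Source B's fib_pair: (F(n), F(n+1)) by fast doubling; recursion on n // 2 as in the Python
def pvFibPair : Nat → Int × Int
  | 0 => (0, 1)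
  | n + 1 =>
    let p := pvFibPair ((n + 1) / 2)
    let a := p.1
    let b := p.2
    let c := a * (2 * b - a)
    let d := a * a + b * b
    if (n + 1) % 2 == 0 then (c, d) else (d, c + d)
decreasing_by omega

def fibonnaci_series_alt (string : String) : String :=
  if !PySem.Str.strIsdigit string then
    "Please only input integers between 1 and 100, inclusive!"
  else
    let count : Int := (PySem.Int.ofStr? string).getD 0
    if count < 1 || count > 100 then
      "Please enter an integer between 1 and 100, inclusive!"
    else
      -- " ".join(str(fib_pair(i)[0]) for i in range(count)); i ≥ 0 here, so i.toNat is exact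
      PySem.Str.join " "
        ((PySem.List.pyRange 0 count 1).map (fun i => PySem.Int.toStr (pvFibPair i.toNat).1))

-- ===== PRECONDITION & SPEC =====
def Spec_fibonnaci_series (string : String) (out : String) : Prop := out = fibonnaci_series_alt string
instance (string : String) (out : String) : Decidable (Spec_fibonnaci_series string out) := by unfold Spec_fibonnaci_series; infer_instance

-- ===== CLAIM (what is proved, stated in full; the proofs are below) =====
def Claim_equal_fibonnaci_series : Prop := ∀ (string : String), Dom_fibonnaci_series string → Spec_fibonnaci_series string (fibonnaci_series string)

-- ===== LEMMAS AND PROOFS =====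

-- fast doubling computes Fibonacci
theorem pvFibPair_eq (n : Nat) : pvFibPair n = ((Nat.fib n : Int), (Nat.fib (n + 1) : Int)) := by
  induction n using Nat.strong_induction_on with
  | _ n ih =>
    match n with
    | 0 => simp [pvFibPair]
    | m + 1 =>
      rw [pvFibPair]
      rw [ih ((m + 1) / 2) (by omega)]
      have hab : Nat.fib ((m + 1) / 2) ≤ 2 * Nat.fib ((m + 1) / 2 + 1) :=
        le_trans (Nat.fib_le_fib_succ) (by omega)
      obtain ⟨k, hk⟩ : ∃ k, (m + 1) / 2 = k := ⟨_, rfl⟩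
      rw [hk] at hab ⊢
      have e1 : ((Nat.fib (2 * k) : Nat) : Int)
          = (Nat.fib k : Int) * (2 * (Nat.fib (k + 1) : Int) - (Nat.fib k : Int)) := by
        have hmm : Nat.fib k * Nat.fib k ≤ Nat.fib k * (2 * Nat.fib (k + 1)) :=
          Nat.mul_le_mul_left _ hab
        rw [Nat.fib_two_mul, Nat.mul_sub, Nat.cast_sub hmm]
        push_cast
        ring
      have e2 : ((Nat.fib (2 * k + 1) : Nat) : Int)
          = (Nat.fib k : Int) * (Nat.fib k : Int) + (Nat.fib (k + 1) : Int) * (Nat.fib (k + 1) : Int) := by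
        rw [Nat.fib_two_mul_add_one]
        push_cast
        ring
      rcases Nat.even_or_odd (m + 1) with he | ho
      · obtain ⟨j, hj⟩ := he
        have hm1 : m + 1 = 2 * k := by omega
        have hmod : (m + 1) % 2 = 0 := by omega
        rw [hmod, hm1, if_pos (by decide)]
        exact Prod.ext e1.symm e2.symm
      · obtain ⟨j, hj⟩ := ho
        have hm1 : m + 1 = 2 * k + 1 := by omega
        have hmod : (m + 1) % 2 = 1 := by omega
        rw [hmod, hm1, if_neg (by decide)]
        have h4 : Nat.fib (2 * k + 1 + 1) = Nat.fib (2 * k) + Nat.fib (2 * k + 1) := by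
          rw [show 2 * k + 1 + 1 = 2 * k + 2 by omega, Nat.fib_add_two]
        refine Prod.ext e2.symm ?_
        show _ = ((Nat.fib (2 * k + 1 + 1) : Nat) : Int)
        rw [h4]
        push_cast
        rw [e1, e2]

-- the list of the first n Fibonacci term strings (what B joins)
def pvTerms (n : Nat) : List String :=
  (List.range n).map (fun k => PySem.Int.toStr ((Nat.fib k : Int)))

theorem pvJoin_append (xs : List String) (x : String) (h : xs ≠ []) :
    PySem.Str.join " " (xs ++ [x]) = PySem.Str.join " " xs ++ " " ++ x := by
  rw [← String.toList_inj]
  simp only [PySem.Str.toList_join, List.map_append, List.map_cons, List.map_nil,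
    String.toList_append]
  induction xs with
  | nil => exact absurd rfl h
  | cons y ys ih =>
    cases ys with
    | nil => simp [PySem.Chars.join_cons_cons, PySem.Chars.join_singleton]
    | cons z zs =>
      simp only [List.map_cons, List.cons_append, PySem.Chars.join_cons_cons,
        List.append_assoc] at *
      rw [ih (by simp)]

-- A's loop invariant: after range(2, n+2) the state is (F n, F (n+1), join of the first n+2 terms)
theorem pvFoldA (n : Nat) :
    (PySem.List.pyRange 2 ((n : Int) + 2) 1).foldl
        (fun (st : Int × Int × String) _ =>
          let c := st.1 + st.2.1
          (st.2.1, c, st.2.2 ++ " " ++ PySem.Int.toStr c))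
        (0, 1, "0 1")
      = ((Nat.fib n : Int), (Nat.fib (n + 1) : Int), PySem.Str.join " " (pvTerms (n + 2))) := by
  induction n with
  | zero =>
    rw [PySem.List.pyRange_one_eq_nil (by omega)]
    simp only [List.foldl_nil, pvTerms]
    decide
  | succ m ih =>
    push_cast
    have hsplit : PySem.List.pyRange 2 ((m : Int) + 1 + 2) 1
        = PySem.List.pyRange 2 ((m : Int) + 2) 1 ++ [(m : Int) + 2] := by
      have := PySem.List.pyRange_one_succ_right (a := 2) (b := (m : Int) + 2) (by omega)
      rw [show (m : Int) + 1 + 2 = (m : Int) + 2 + 1 by ring, this]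
    rw [hsplit, List.foldl_append, ih]
    simp only [List.foldl_cons, List.foldl_nil]
    refine Prod.ext rfl (Prod.ext ?_ ?_)
    · show ((Nat.fib m : Int) + (Nat.fib (m + 1) : Int)) = (Nat.fib (m + 1 + 1) : Int)
      rw [Nat.fib_add_two]; push_cast; ring
    · show PySem.Str.join " " (pvTerms (m + 2)) ++ " " ++ PySem.Int.toStr ((Nat.fib m : Int) + (Nat.fib (m + 1) : Int))
        = PySem.Str.join " " (pvTerms (m + 1 + 2))
      have hfib : (Nat.fib m : Int) + (Nat.fib (m + 1) : Int) = (Nat.fib (m + 2) : Int) := by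
        rw [Nat.fib_add_two]; push_cast; ring
      rw [hfib]
      have : pvTerms (m + 1 + 2) = pvTerms (m + 2) ++ [PySem.Int.toStr ((Nat.fib (m + 2) : Int))] := by
        simp [pvTerms, List.range_succ]
      rw [this, pvJoin_append _ _ (by simp [pvTerms, List.range_succ])]

-- B's map over range(count) is exactly pvTerms
theorem pvMapB (cnt : Int) (h : 0 ≤ cnt) :
    (PySem.List.pyRange 0 cnt 1).map (fun i => PySem.Int.toStr (pvFibPair i.toNat).1)
      = pvTerms cnt.toNat := by
  rw [show cnt = (cnt.toNat : Int) by omega, PySem.List.pyRange_zero_nat, List.map_map, pvTerms]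
  refine List.map_congr_left (fun k hk => ?_)
  simp [pvFibPair_eq]

-- ===== VERDICT (by name: the statement is the Claim_ definition above) =====
theorem fibonnaci_series_spec : Claim_equal_fibonnaci_series := by
  intro s _
  show fibonnaci_series s = fibonnaci_series_alt s
  unfold fibonnaci_series fibonnaci_series_alt
  by_cases hd : PySem.Str.strIsdigit s
  · simp only [hd, Bool.not_true, Bool.false_eq_true, if_false]
    generalize (PySem.Int.ofStr? s).getD 0 = c
    by_cases hr : (decide (c < 1) || decide (c > 100)) = true
    · simp only [hr, if_true]
    · simp only [hr, Bool.false_eq_true, if_false]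
      simp only [Bool.or_eq_true, decide_eq_true_eq, not_or, not_lt] at hr
      obtain ⟨hge, hle⟩ := hr
      by_cases h1 : (c == 1) = true
      · have hc1 : c = 1 := by simpa using h1
        subst hc1
        rw [if_pos h1]
        rw [pvMapB 1 (by norm_num)]
        decide
      · rw [if_neg (by simpa using h1)]
        have h2 : 2 ≤ c := by
          have : c ≠ 1 := by simpa using h1
          omega
        obtain ⟨m, hm⟩ : ∃ m : Nat, c = (m : Int) + 2 := ⟨(c - 2).toNat, by omega⟩
        subst hm
        rw [pvFoldA m, pvMapB _ (by omega), show ((m : Int) + 2).toNat = m + 2 by omega]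
  · simp only [Bool.not_eq_true] at hd
    simp only [hd, Bool.not_false, if_true]
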